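-- pv_equiv track=rewrite | github.com/WYW-min/extract4chem_fluorine | src/extract_chem_2/characterization_before/builder.py | split_into_heading_segments
-- ===== SOURCE A (Python) =====
-- def split_into_heading_segments(lines: list[str]) -> list[tuple[int, int]]:
--     if not lines:
--         return []
--     heading_indices = [
--         idx for idx, line in enumerate(lines)
--         if idx > 0 and line.lstrip().startswith("#")
--     ]
--     if not heading_indices:
--         return [(0, len(lines) - 1)]
--
--     segments: list[tuple[int, int]] = []
--     start_idx = 0
--     for heading_idx in heading_indices:
--         segments.append((start_idx, heading_idx - 1))
--         start_idx = heading_idx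
--     segments.append((start_idx, len(lines) - 1))
--     return segments
-- ===== SOURCE B (Python) =====
-- def split_into_heading_segments(lines: list[str]) -> list[tuple[int, int]]:
--     n = len(lines)
--     segments: list[tuple[int, int]] = []
--     start = 0
--     while start < n:
--         nxt = start + 1
--         while nxt < n and not lines[nxt].lstrip().startswith("#"):
--             nxt += 1
--         segments.append((start, nxt - 1))
--         start = nxt
--     return segments
-- ===== Notes on version B (the rewrite author's own statement) =====
-- stated objective: alternative
-- what changed: B iterates over segments, not lines: an outer while loop that for each segment scans forward to the next heading line and emits (start, next-1), instead of A's enumerate pass collecting all heading indices followed by a fold pairing consecutive boundaries; the empty and no-heading special cases disappear.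
import Mathlib
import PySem

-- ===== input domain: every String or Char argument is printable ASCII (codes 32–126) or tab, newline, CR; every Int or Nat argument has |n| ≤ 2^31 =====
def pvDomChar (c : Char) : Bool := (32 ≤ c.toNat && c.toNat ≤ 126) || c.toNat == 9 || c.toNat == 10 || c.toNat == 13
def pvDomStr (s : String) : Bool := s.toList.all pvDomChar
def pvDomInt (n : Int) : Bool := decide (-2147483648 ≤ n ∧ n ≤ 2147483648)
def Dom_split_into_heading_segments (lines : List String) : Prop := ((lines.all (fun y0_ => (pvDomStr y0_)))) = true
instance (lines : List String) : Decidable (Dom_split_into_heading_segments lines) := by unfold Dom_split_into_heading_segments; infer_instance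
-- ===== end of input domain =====

-- B iterates over segments (outer while loop, each step scanning forward for the next
-- heading line) instead of A's enumerate pass that collects all heading indices and then
-- folds over them; same return value (alternative decomposition).

-- ===== PORT A =====
def pvIsHeading (line : String) : Bool := PySem.Str.startswith (PySem.Str.lstrip line) "#"

def split_into_heading_segments (lines : List String) : List (Int × Int) :=
  if lines = [] then []
  else
    let heading_indices : List Int :=
      (PySem.List.enumerate lines).filterMap
        (fun p => if p.1 > 0 ∧ pvIsHeading p.2 then some p.1 else none)
    if heading_indices = [] then [(0, (lines.length : Int) - 1)]
    else
      let acc := heading_indices.foldl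
        (fun (acc : List (Int × Int) × Int) heading_idx =>
          (acc.1 ++ [(acc.2, heading_idx - 1)], heading_idx)) ([], 0)
      acc.1 ++ [(acc.2, (lines.length : Int) - 1)]

-- ===== PORT B =====
-- inner while loop of Source B: first index j ≥ i with lines[j] a heading, or lines.length
def pvNextHeading (lines : List String) (i : Nat) : Nat :=
  if i < lines.length then
    if pvIsHeading (lines.getD i "") then i else pvNextHeading lines (i + 1)
  else i
termination_by lines.length - i

theorem pvNextHeading_ge (lines : List String) (i : Nat) : i ≤ pvNextHeading lines i := by
  fun_induction pvNextHeading lines i with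
  | case1 => omega
  | case2 _ _ _ ih => omega
  | case3 => omega

-- outer while loop of Source B: emit one segment per iteration, jump start to the next heading
def pvSeg (lines : List String) (start : Nat) : List (Int × Int) :=
  if start < lines.length then
    let nxt := pvNextHeading lines (start + 1)
    ((start : Int), (nxt : Int) - 1) :: pvSeg lines nxt
  else []
termination_by lines.length - start
decreasing_by have := pvNextHeading_ge lines (start + 1); omega

def split_into_heading_segments_alt (lines : List String) : List (Int × Int) :=
  pvSeg lines 0

-- ===== PRECONDITION & SPEC =====
def Spec_split_into_heading_segments (lines : List String) (out : List (Int × Int)) : Prop := out = split_into_heading_segments_alt lines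
instance (lines : List String) (out : List (Int × Int)) : Decidable (Spec_split_into_heading_segments lines out) := by unfold Spec_split_into_heading_segments; infer_instance

-- ===== CLAIM (what is proved, stated in full; the proofs are below) =====
def Claim_equal_split_into_heading_segments : Prop := ∀ (lines : List String), Dom_split_into_heading_segments lines → Spec_split_into_heading_segments lines (split_into_heading_segments lines)

-- ===== LEMMAS AND PROOFS =====

theorem pvNextHeading_le (lines : List String) (i : Nat) (h : i ≤ lines.length) :
    pvNextHeading lines i ≤ lines.length := by
  fun_induction pvNextHeading lines i with
  | case1 => omega
  | case2 _ h1 _ ih => exact ih (by omega)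
  | case3 => omega

theorem pvNextHeading_eq_of_hit (lines : List String) (i : Nat) (hlt : i < lines.length)
    (hh : pvIsHeading (lines.getD i "") = true) : pvNextHeading lines i = i := by
  rw [pvNextHeading, if_pos hlt, if_pos hh]

theorem pvNextHeading_eq_of_miss (lines : List String) (i : Nat) (hlt : i < lines.length)
    (hh : ¬ pvIsHeading (lines.getD i "") = true) :
    pvNextHeading lines i = pvNextHeading lines (i + 1) := by
  rw [pvNextHeading, if_pos hlt, if_neg hh]

-- the list of heading indices ≥ i, in increasing order
def pvNatHeads (lines : List String) (i : Nat) : List Nat :=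
  let m := pvNextHeading lines i
  if _ : m < lines.length then m :: pvNatHeads lines (m + 1)
  else []
termination_by lines.length - i
decreasing_by have := pvNextHeading_ge lines i; omega

theorem pvNatHeads_skip (lines : List String) (i : Nat) (hlt : i < lines.length)
    (hnh : ¬ pvIsHeading (lines.getD i "") = true) :
    pvNatHeads lines i = pvNatHeads lines (i + 1) := by
  conv_lhs => rw [pvNatHeads]
  conv_rhs => rw [pvNatHeads]
  rw [pvNextHeading_eq_of_miss lines i hlt hnh]

theorem pvNatHeads_here (lines : List String) (i : Nat) (hlt : i < lines.length)
    (hnh : pvIsHeading (lines.getD i "") = true) :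
    pvNatHeads lines i = i :: pvNatHeads lines (i + 1) := by
  rw [pvNatHeads]
  rw [pvNextHeading_eq_of_hit lines i hlt hnh]
  rw [dif_pos hlt]

theorem pvNatHeads_stop (lines : List String) (i : Nat) (hge : lines.length ≤ i) :
    pvNatHeads lines i = [] := by
  rw [pvNatHeads]
  have := pvNextHeading_ge lines i
  rw [dif_neg (by omega)]

-- A's filtered index list (restricted to indices ≥ i ≥ 1) is pvNatHeads, as Ints
theorem pv_filter_eq_natHeads (lines : List String) (i : Nat) (h1 : 1 ≤ i) :
    (PySem.List.pyRange (i : Int) (lines.length : Int) 1).filterMap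
      (fun j => if j > 0 ∧ pvIsHeading (PySem.List.pyGetD lines j "") then some j else none)
      = (pvNatHeads lines i).map (fun k : Nat => (k : Int)) := by
  by_cases hlt : i < lines.length
  · rw [PySem.List.pyRange_one_cons (by exact_mod_cast hlt)]
    rw [show ((i : Int) + 1) = ((i + 1 : Nat) : Int) by push_cast; ring]
    have hget : PySem.List.pyGetD lines (i : Int) "" = lines.getD i "" := by
      simp [PySem.List.pyGetD_natCast]
    by_cases hh : pvIsHeading (lines.getD i "") = true
    · rw [pvNatHeads_here lines i hlt hh]
      have hcond : ((i : Int) > 0 ∧ pvIsHeading (PySem.List.pyGetD lines (i : Int) "") = true) :=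
        ⟨by exact_mod_cast h1, by rw [hget]; exact hh⟩
      simp only [List.filterMap_cons]
      rw [if_pos hcond, List.map_cons]
      exact congrArg _ (pv_filter_eq_natHeads lines (i + 1) (by omega))
    · rw [pvNatHeads_skip lines i hlt hh]
      simp only [List.filterMap_cons]
      rw [if_neg (by rintro ⟨-, hc⟩; rw [hget] at hc; exact hh hc)]
      exact pv_filter_eq_natHeads lines (i + 1) (by omega)
  · rw [PySem.List.pyRange_one_eq_nil (by exact_mod_cast (by omega : lines.length ≤ i)),
        pvNatHeads_stop lines i (by omega)]
    rfl
termination_by lines.length - i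

-- the segments produced from boundary list hs with current start s
def pvSegNat (n : Nat) : List Nat → Nat → List (Int × Int)
  | [], s => [((s : Int), (n : Int) - 1)]
  | h :: t, s => ((s : Int), (h : Int) - 1) :: pvSegNat n t h

-- B's outer loop computes pvSegNat over the heading indices after start
theorem pvSeg_eq_segNat (lines : List String) (start : Nat) (h : start < lines.length) :
    pvSeg lines start = pvSegNat lines.length (pvNatHeads lines (start + 1)) start := by
  rw [pvSeg, if_pos h]
  have hle : pvNextHeading lines (start + 1) ≤ lines.length :=
    pvNextHeading_le lines (start + 1) (by omega)
  have hge : start + 1 ≤ pvNextHeading lines (start + 1) := pvNextHeading_ge lines (start + 1)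
  rw [pvNatHeads]
  by_cases hlt : pvNextHeading lines (start + 1) < lines.length
  · rw [dif_pos hlt]
    simp only [pvSegNat]
    rw [pvSeg_eq_segNat lines _ hlt]
  · rw [dif_neg hlt]
    have hn : pvNextHeading lines (start + 1) = lines.length := by omega
    simp only [pvSegNat, hn]
    rw [pvSeg, if_neg (by omega)]
termination_by lines.length - start
decreasing_by omega

-- A's fold over the boundary list, flattened to pvSegNat
theorem pv_fold_eq_segNat (n : Nat) (hs : List Nat) (accL : List (Int × Int)) (s : Nat) :
    (let r := (hs.map (fun k : Nat => (k : Int))).foldl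
        (fun (acc : List (Int × Int) × Int) h => (acc.1 ++ [(acc.2, h - 1)], h)) (accL, (s : Int));
      r.1 ++ [(r.2, (n : Int) - 1)]) = accL ++ pvSegNat n hs s := by
  induction hs generalizing accL s with
  | nil => simp [pvSegNat]
  | cons h t ih =>
    simp only [List.map_cons, List.foldl_cons]
    rw [ih (accL ++ [((s : Int), (h : Int) - 1)]) h]
    simp [pvSegNat]

-- ===== VERDICT (by name: the statement is the Claim_ definition above) =====
theorem split_into_heading_segments_spec : Claim_equal_split_into_heading_segments := by
  intro lines _
  unfold Spec_split_into_heading_segments split_into_heading_segments split_into_heading_segments_alt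
  by_cases hnil : lines = []
  · subst hnil
    simp [pvSeg]
  · have hpos : 0 < lines.length := List.length_pos_iff.mpr hnil
    rw [if_neg hnil]
    have henum : (PySem.List.enumerate lines).filterMap
        (fun p => if p.1 > 0 ∧ pvIsHeading p.2 then some p.1 else none)
        = (pvNatHeads lines 1).map (fun k : Nat => (k : Int)) := by
      rw [PySem.List.enumerate_eq_map_pyRange lines ""]
      rw [List.filterMap_map]
      rw [show PySem.List.len lines = (lines.length : Int) from rfl]
      rw [show PySem.List.pyRange 0 (lines.length : Int) 1
          = (0 : Int) :: PySem.List.pyRange ((1 : Nat) : Int) (lines.length : Int) 1 by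
        rw [PySem.List.pyRange_one_cons (by exact_mod_cast hpos)]; norm_num]
      rw [List.filterMap_cons_none (by simp [Function.comp])]
      have := pv_filter_eq_natHeads lines 1 (le_refl 1)
      simpa [Function.comp] using this
    rw [henum]
    by_cases hh : pvNatHeads lines 1 = []
    · rw [hh]
      simp only [List.map_nil]
      rw [if_pos trivial]
      rw [pvSeg_eq_segNat lines 0 hpos]
      simp [hh, pvSegNat]
    · rw [if_neg (by simp [hh])]
      have := pv_fold_eq_segNat lines.length (pvNatHeads lines 1) [] 0
      simp only [Int.natCast_zero, List.nil_append] at this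
      rw [this, pvSeg_eq_segNat lines 0 hpos]
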